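-- pv_equiv track=rewrite | github.com/zhihanxu/DSA_training | company/meta/oa/n2p4.py | count_prefixes
-- ===== SOURCE A (Python) =====
-- def count_prefixes(arr):
--     prefix_count = 0
--     n = len(arr)
--
--     for i in range(n):
--         for j in range(i + 1, n):
--             if arr[j].startswith(arr[i]):
--                 prefix_count += 1
--     return prefix_count
-- ===== SOURCE B (Python) =====
-- def count_prefixes(arr):
--     cnt = {}
--     total = 0
--     for w in arr:
--         for k in range(len(w) + 1):
--             total += cnt.get(w[:k], 0)
--         cnt[w] = cnt.get(w, 0) + 1
--     return total
-- ===== Notes on version B (the rewrite author's own statement) =====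
-- stated objective: faster
-- what changed: Replaces the O(n^2) all-pairs scan with a single left-to-right pass that keeps a hash-map count of words seen so far and, for each word, sums the counts of its len(w)+1 prefixes.
import Mathlib
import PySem

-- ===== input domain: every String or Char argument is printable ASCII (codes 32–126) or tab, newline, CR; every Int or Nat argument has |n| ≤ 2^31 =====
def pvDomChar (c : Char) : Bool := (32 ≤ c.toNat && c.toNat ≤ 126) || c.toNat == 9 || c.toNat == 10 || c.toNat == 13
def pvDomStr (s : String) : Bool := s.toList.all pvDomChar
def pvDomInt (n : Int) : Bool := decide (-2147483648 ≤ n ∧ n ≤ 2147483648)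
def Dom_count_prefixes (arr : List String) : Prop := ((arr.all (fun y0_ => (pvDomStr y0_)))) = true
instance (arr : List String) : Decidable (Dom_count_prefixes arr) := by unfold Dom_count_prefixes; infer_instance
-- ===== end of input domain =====

-- B replaces A's O(n^2) all-pairs prefix scan with one left-to-right pass keeping a dict of counts of the words seen so far and summing the counts of each word's prefixes (measured faster).


-- ===== PORT A =====
def count_prefixes (arr : List String) : Int :=
  let n : Int := arr.length
  (PySem.List.pyRange 0 n 1).foldl (fun acc i =>
    (PySem.List.pyRange (i + 1) n 1).foldl (fun acc2 j =>
      if PySem.Str.startswith (PySem.List.pyGetD arr j "") (PySem.List.pyGetD arr i "") then acc2 + 1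
      else acc2) acc) 0

-- ===== PORT B =====
def count_prefixes_alt (arr : List String) : Int :=
  (arr.foldl (fun (s : Int × PySem.Dict String Int) w =>
      ((PySem.List.pyRange 0 ((PySem.Str.len w : Int) + 1) 1).foldl
          (fun t k => t + s.2.getD (PySem.Str.slice w none (some k)) 0) s.1,
       s.2.insert w (s.2.getD w 0 + 1))) ((0 : Int), PySem.Dict.empty)).1

-- ===== PRECONDITION & SPEC =====
def Spec_count_prefixes (arr : List String) (out : Int) : Prop := out = count_prefixes_alt arr
instance (arr : List String) (out : Int) : Decidable (Spec_count_prefixes arr out) := by unfold Spec_count_prefixes; infer_instance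

-- ===== CLAIM (what is proved, stated in full; the proofs are below) =====
def Claim_equal_count_prefixes : Prop := ∀ (arr : List String), Dom_count_prefixes arr → Spec_count_prefixes arr (count_prefixes arr)

-- ===== LEMMAS AND PROOFS =====

-- A expressed as a sum over i of "prefix matches among later elements"
theorem pvA_eq_sum (arr : List String) :
    count_prefixes arr = ((PySem.List.pyRange 0 (arr.length : Int) 1).map
      (fun i => ((arr.drop (i.toNat + 1)).countP
        (fun x => PySem.Str.startswith x (PySem.List.pyGetD arr i "")) : Int))).sum := by
  unfold count_prefixes
  dsimp only
  have h : ∀ (acc : Int) (i : Int), i ∈ PySem.List.pyRange 0 (arr.length : Int) 1 →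
      (PySem.List.pyRange (i + 1) (arr.length : Int) 1).foldl
        (fun acc2 j => if PySem.Str.startswith (PySem.List.pyGetD arr j "") (PySem.List.pyGetD arr i "") then acc2 + 1 else acc2) acc
      = acc + ((arr.drop (i.toNat + 1)).countP
          (fun x => PySem.Str.startswith x (PySem.List.pyGetD arr i "")) : Int) := by
    intro acc i hi
    obtain ⟨hi0, hi1⟩ := PySem.List.mem_pyRange_one.mp hi
    rw [PySem.List.foldl_pyRange_pyGetD' arr ""
          (fun acc2 x => if PySem.Str.startswith x (PySem.List.pyGetD arr i "") then acc2 + 1 else acc2)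
          acc (by omega)]
    rw [PySem.List.foldl_if_add_one]
    have ht : (i + 1).toNat = i.toNat + 1 := by omega
    rw [ht]
  rw [PySem.List.foldl_congr_mem (PySem.List.pyRange 0 (arr.length : Int) 1) _
        (fun acc i => acc + ((arr.drop (i.toNat + 1)).countP
          (fun x => PySem.Str.startswith x (PySem.List.pyGetD arr i "")) : Int)) 0 h,
      PySem.List.foldl_add]
  simp

-- appending one word to A adds the number of earlier words that are prefixes of it
theorem pvA_snoc (xs : List String) (w : String) :
    count_prefixes (xs ++ [w]) =
      count_prefixes xs + (xs.countP (fun x => PySem.Str.startswith w x) : Int) := by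
  rw [pvA_eq_sum, pvA_eq_sum]
  have hm : (((xs ++ [w]).length : Nat) : Int) = (xs.length : Int) + 1 := by simp
  rw [hm, PySem.List.pyRange_one_succ_right (by positivity)]
  rw [List.map_append, List.sum_append]
  have hmap : (PySem.List.pyRange 0 (xs.length : Int) 1).map
      (fun i => (((xs ++ [w]).drop (i.toNat + 1)).countP
        (fun x => PySem.Str.startswith x (PySem.List.pyGetD (xs ++ [w]) i "")) : Int))
    = (PySem.List.pyRange 0 (xs.length : Int) 1).map
      (fun i => ((xs.drop (i.toNat + 1)).countP
          (fun x => PySem.Str.startswith x (PySem.List.pyGetD xs i "")) : Int)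
        + (if PySem.Str.startswith w (PySem.List.pyGetD xs i "") then (1 : Int) else 0)) := by
    apply List.map_congr_left
    intro i hi
    obtain ⟨hi0, hi1⟩ := PySem.List.mem_pyRange_one.mp hi
    have hlt : i.toNat < xs.length := by omega
    have hget : PySem.List.pyGetD (xs ++ [w]) i "" = PySem.List.pyGetD xs i "" := by
      rw [PySem.List.pyGetD_eq_getElem _ _ hi0 (by simp; omega),
          PySem.List.pyGetD_eq_getElem _ _ hi0 (by exact_mod_cast hi1),
          List.getElem_append_left hlt]
    have hdrop : (xs ++ [w]).drop (i.toNat + 1) = xs.drop (i.toNat + 1) ++ [w] := by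
      rw [List.drop_append_of_le_length (by omega)]
    rw [hget, hdrop, List.countP_append]
    push_cast
    congr 1
    simp [List.countP_cons]
  rw [hmap, PySem.List.sum_map_add_int]
  have hsum : ((PySem.List.pyRange 0 (xs.length : Int) 1).map
      (fun i => if PySem.Str.startswith w (PySem.List.pyGetD xs i "") then (1 : Int) else 0)).sum
      = (xs.countP (fun x => PySem.Str.startswith w x) : Int) := by
    have := PySem.List.map_pyGetD_pyRange_zero' xs ""
    calc ((PySem.List.pyRange 0 (xs.length : Int) 1).map
        (fun i => if PySem.Str.startswith w (PySem.List.pyGetD xs i "") then (1 : Int) else 0)).sum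
        = (((PySem.List.pyRange 0 (xs.length : Int) 1).map
            (fun i => PySem.List.pyGetD xs i "")).map
            (fun x => if PySem.Str.startswith w x then (1 : Int) else 0)).sum := by
          rw [List.map_map]
          rfl
      _ = (xs.map (fun x => if PySem.Str.startswith w x then (1 : Int) else 0)).sum := by rw [this]
      _ = _ := PySem.List.sum_map_ite_one_zero _ xs
  rw [hsum]
  simp

-- the dict component of B's fold ignores the running total
theorem pvB_dict (xs : List String) (t : Int) (d : PySem.Dict String Int) :
    (xs.foldl (fun (s : Int × PySem.Dict String Int) w =>
      ((PySem.List.pyRange 0 ((PySem.Str.len w : Int) + 1) 1).foldl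
          (fun t k => t + s.2.getD (PySem.Str.slice w none (some k)) 0) s.1,
       s.2.insert w (s.2.getD w 0 + 1))) (t, d)).2 =
    xs.foldl (fun d w => d.insert w (d.getD w 0 + 1)) d := by
  induction xs generalizing t d with
  | nil => rfl
  | cons x rest ih => simpa using ih _ _

-- the counting dict counts occurrences
theorem pvGetD_fold (xs : List String) (d : PySem.Dict String Int) (p : String) :
    (xs.foldl (fun d w => d.insert w (d.getD w 0 + 1)) d).getD p 0 =
      d.getD p 0 + (xs.count p : Int) := by
  exact PySem.Dict.getD_foldl_insert_add_one xs d p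

-- exactly one k in 0..len w has w[:k] = x, iff x is a prefix of w
theorem pvSlice_count (w x : String) :
    ((PySem.List.pyRange 0 ((PySem.Str.len w : Int) + 1) 1).map
       (fun k => if PySem.Str.slice w none (some k) == x then (1 : Int) else 0)).sum
    = if PySem.Str.startswith w x then 1 else 0 := by
  rw [PySem.List.sum_map_ite_one_zero]
  by_cases h : PySem.Str.startswith w x
  · have hpre : x.toList <+: w.toList := by
      have := (PySem.Chars.startswith_iff w.toList x.toList).mp (by simpa using h)
      exact this
    have hlen : x.toList.length ≤ w.toList.length := hpre.length_le
    have hcount : (PySem.List.pyRange 0 ((PySem.Str.len w : Int) + 1) 1).countP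
        (fun k => PySem.Str.slice w none (some k) == x)
        = (PySem.List.pyRange 0 ((PySem.Str.len w : Int) + 1) 1).countP
        (fun k => k == (x.toList.length : Int)) := by
      apply List.countP_congr
      intro k hk
      obtain ⟨hk0, hk1⟩ := PySem.List.mem_pyRange_one.mp hk
      have hw : w.length = w.toList.length := by simp
      have hkl : k ≤ (w.toList.length : Int) := by
        simp [PySem.Str.len_eq] at hk1
        omega
      simp only [beq_iff_eq]
      constructor
      · intro hs
        have : (PySem.Str.slice w none (some k)).toList = x.toList := by rw [hs]
        rw [PySem.Str.toList_slice, PySem.Chars.slice_eq_listSlice,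
            PySem.List.slice_to _ hk0] at this
        have hl : (w.toList.take k.toNat).length = x.toList.length := by rw [this]
        rw [List.length_take] at hl
        omega
      · intro hkx
        apply String.ext
        rw [PySem.Str.toList_slice, PySem.Chars.slice_eq_listSlice,
            PySem.List.slice_to _ hk0]
        have : k.toNat = x.toList.length := by omega
        rw [this]
        exact (List.prefix_iff_eq_take.mp hpre).symm
    rw [hcount]
    have hmem : (x.toList.length : Int) ∈ PySem.List.pyRange 0 ((PySem.Str.len w : Int) + 1) 1 := by
      rw [PySem.List.mem_pyRange_one]
      constructor
      · positivity
      · have hw : w.length = w.toList.length := by simp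
        have hx : x.length = x.toList.length := by simp
        simp [PySem.Str.len_eq]
        omega
    have h1 : (PySem.List.pyRange 0 ((PySem.Str.len w : Int) + 1) 1).count (x.toList.length : Int) = 1 :=
      List.count_eq_one_of_mem (PySem.List.nodup_pyRange_one _ _) hmem
    rw [if_pos h]
    rw [List.count] at h1
    rw [h1]
    simp
  · rw [if_neg h]
    have : (PySem.List.pyRange 0 ((PySem.Str.len w : Int) + 1) 1).countP
        (fun k => PySem.Str.slice w none (some k) == x) = 0 := by
      rw [List.countP_eq_zero]
      intro k hk
      obtain ⟨hk0, hk1⟩ := PySem.List.mem_pyRange_one.mp hk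
      simp only [beq_iff_eq]
      intro hs
      apply h
      have : (PySem.Str.slice w none (some k)).toList = x.toList := by rw [hs]
      rw [PySem.Str.toList_slice, PySem.Chars.slice_eq_listSlice,
          PySem.List.slice_to _ hk0] at this
      have hpre : x.toList <+: w.toList := this ▸ List.take_prefix _ _
      simpa using (PySem.Chars.startswith_iff w.toList x.toList).mpr hpre
    rw [this]
    simp

-- summing occurrence counts of all prefixes of w counts words that prefix w
theorem pvSum_prefix_counts (xs : List String) (w : String) :
    ((PySem.List.pyRange 0 ((PySem.Str.len w : Int) + 1) 1).map
       (fun k => (xs.count (PySem.Str.slice w none (some k)) : Int))).sum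
    = (xs.countP (fun x => PySem.Str.startswith w x) : Int) := by
  induction xs with
  | nil => simp
  | cons x rest ih =>
    have hmap : (PySem.List.pyRange 0 ((PySem.Str.len w : Int) + 1) 1).map
        (fun k => ((x :: rest).count (PySem.Str.slice w none (some k)) : Int))
      = (PySem.List.pyRange 0 ((PySem.Str.len w : Int) + 1) 1).map
        (fun k => (rest.count (PySem.Str.slice w none (some k)) : Int)
          + (if PySem.Str.slice w none (some k) == x then (1 : Int) else 0)) := by
      apply List.map_congr_left
      intro k _
      rw [List.count_cons]
      push_cast
      congr 1
      by_cases hxe : PySem.Str.slice w none (some k) = x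
      · simp [hxe]
      · simp [beq_iff_eq, hxe, Ne.symm hxe]
    rw [hmap, PySem.List.sum_map_add_int, ih, pvSlice_count]
    rw [List.countP_cons]
    push_cast
    congr 1

theorem pvB_snoc (xs : List String) (w : String) :
    count_prefixes_alt (xs ++ [w]) =
      count_prefixes_alt xs + (xs.countP (fun x => PySem.Str.startswith w x) : Int) := by
  unfold count_prefixes_alt
  rw [List.foldl_append, List.foldl_cons, List.foldl_nil]
  rw [PySem.List.foldl_add]
  rw [pvB_dict]
  simp only [pvGetD_fold, PySem.Dict.getD_empty, zero_add]
  rw [pvSum_prefix_counts]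

theorem pvMain (arr : List String) : count_prefixes arr = count_prefixes_alt arr := by
  induction arr using List.reverseRecOn with
  | nil => rfl
  | append_singleton xs w ih => rw [pvA_snoc, pvB_snoc, ih]


-- ===== VERDICT (by name: the statement is the Claim_ definition above) =====
theorem count_prefixes_spec : Claim_equal_count_prefixes := by
  intro arr _
  unfold Spec_count_prefixes
  exact pvMain arr
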